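-- pv_equiv track=rewrite | github.com/keerthivasan03/JS2025 | practise 10.py | uneven
-- ===== SOURCE A (Python) =====
-- def uneven(pop):
--     i=""
--     p=""
--     j= pop.split()
--     for x in j:
--         if x.isalpha():
--             i+= x+" "
--         else:
--             p=x
--     return "{} is the price ${}".format(i,p)
-- ===== SOURCE B (Python) =====
-- def uneven(pop):
--     i = ""
--     p = ""
--     cur = ""
--     for c in pop:
--         if c.isspace():
--             if cur:
--                 if cur.isalpha():
--                     i += cur + " "
--                 else:
--                     p = cur
--                 cur = ""
--         else:
--             cur += c
--     if cur:
--         if cur.isalpha():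
--             i += cur + " "
--         else:
--             p = cur
--     return "{} is the price ${}".format(i, p)
-- ===== Notes on version B (the rewrite author's own statement) =====
-- stated objective: alternative
-- what changed: B never calls split(): it is a character-level state machine that tokenizes the string itself, buffering the current token and flushing it into the words accumulator or the price slot at each whitespace boundary and at end of string.
import Mathlib
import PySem

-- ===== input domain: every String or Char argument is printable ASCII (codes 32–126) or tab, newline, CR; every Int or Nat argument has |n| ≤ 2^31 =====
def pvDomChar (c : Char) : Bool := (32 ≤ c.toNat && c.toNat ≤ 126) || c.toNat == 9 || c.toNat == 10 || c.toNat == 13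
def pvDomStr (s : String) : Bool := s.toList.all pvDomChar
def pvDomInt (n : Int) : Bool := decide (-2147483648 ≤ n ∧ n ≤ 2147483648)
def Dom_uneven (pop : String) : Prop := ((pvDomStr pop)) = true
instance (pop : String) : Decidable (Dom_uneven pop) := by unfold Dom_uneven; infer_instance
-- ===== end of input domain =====

-- B replaces A's split()-then-classify loop by a character-level state machine that tokenizes the string itself (alternative decomposition, same cost).

-- ===== PORT A =====
def uneven (pop : String) : String :=
  let j := PySem.Chars.split₀ pop.toList
  let st := j.foldl (fun (s : List Char × List Char) x =>
      if PySem.Chars.strIsalpha x then (s.1 ++ x ++ [' '], s.2) else (s.1, x)) ([], [])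
  String.mk (st.1 ++ " is the price $".toList ++ st.2)

-- ===== PORT B =====
-- the `if cur:` flush body of Source B (used at a whitespace boundary and at end of string)
def unevenFlush (cur : List Char) (st : List Char × List Char) : List Char × List Char :=
  if cur.isEmpty then st
  else if PySem.Chars.strIsalpha cur then (st.1 ++ cur ++ [' '], st.2) else (st.1, cur)

-- Source B's character loop: buffer `cur`, state (i, p)
def unevenGo : List Char → List Char → List Char × List Char → List Char × List Char
  | [], cur, st => unevenFlush cur st
  | c :: rest, cur, st =>
      if PySem.Chars.isspace c then
        if cur.isEmpty then unevenGo rest [] st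
        else unevenGo rest [] (unevenFlush cur st)
      else unevenGo rest (cur ++ [c]) st

def uneven_alt (pop : String) : String :=
  let st := unevenGo pop.toList [] ([], [])
  String.mk (st.1 ++ " is the price $".toList ++ st.2)

-- ===== PRECONDITION & SPEC =====
def Spec_uneven (pop : String) (out : String) : Prop := out = uneven_alt pop
instance (pop : String) (out : String) : Decidable (Spec_uneven pop out) := by unfold Spec_uneven; infer_instance

-- ===== CLAIM (what is proved, stated in full; the proofs are below) =====
def Claim_equal_uneven : Prop := ∀ (pop : String), Dom_uneven pop → Spec_uneven pop (uneven pop)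

-- ===== LEMMAS AND PROOFS =====
theorem split₀_go_acc (s : List Char) (cur : List Char) (acc : List (List Char)) :
    PySem.Chars.split₀.go s cur acc = acc.reverse ++ PySem.Chars.split₀.go s cur [] := by
  induction s generalizing cur acc with
  | nil =>
    simp [PySem.Chars.split₀.go]
    split_ifs <;> simp
  | cons c rest ih =>
    simp only [PySem.Chars.split₀.go]
    split_ifs with h1 h2
    · rw [ih [] acc]
    · rw [ih [] (cur.reverse :: acc), ih [] [cur.reverse]]
      simp
    · exact ih (c :: cur) acc

theorem unevenGo_eq_fold (s : List Char) (cur : List Char) (st : List Char × List Char) :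
    unevenGo s cur st =
      (PySem.Chars.split₀.go s cur.reverse []).foldl (fun (s : List Char × List Char) x =>
        if PySem.Chars.strIsalpha x = true then (s.1 ++ x ++ [' '], s.2) else (s.1, x)) st := by
  induction s generalizing cur st with
  | nil =>
    simp only [unevenGo, PySem.Chars.split₀.go, List.isEmpty_reverse]
    by_cases h : cur.isEmpty <;> simp [unevenFlush, h, List.foldl]
  | cons c rest ih =>
    simp only [unevenGo, PySem.Chars.split₀.go, List.isEmpty_reverse]
    by_cases h1 : PySem.Chars.isspace c = true
    · by_cases h2 : cur.isEmpty
      · simp only [h1, h2, if_true, ih []]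
        rfl
      · simp only [h1, h2, if_true, Bool.false_eq_true, if_false, ih [], List.reverse_nil]
        rw [split₀_go_acc rest [] [cur.reverse.reverse]]
        simp only [List.reverse_cons, List.reverse_nil, List.nil_append,
          List.reverse_reverse, List.singleton_append, List.foldl_cons]
        congr 1
        simp [unevenFlush, h2]
    · simp only [h1, Bool.false_eq_true, if_false, ih (cur ++ [c])]
      simp

theorem uneven_spec' (pop : String) : uneven pop = uneven_alt pop := by
  unfold uneven uneven_alt PySem.Chars.split₀
  rw [unevenGo_eq_fold]
  rfl

-- ===== VERDICT (by name: the statement is the Claim_ definition above) =====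
theorem uneven_spec : Claim_equal_uneven := by
  intro pop _
  exact uneven_spec' pop
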